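-- pv_equiv track=rewrite | github.com/arpitkarnatak/ds-algo-important-ques | greedy.algo/file1.py | IslandSurvival
-- ===== SOURCE A (Python) =====
-- def IslandSurvival(days_to_survive, max_food, req_food):
--     ##https://www.geeksforgeeks.org/survival/
--     ## Add max food for 6 days and subtract req food everyday to food left.
--     ## whenever there is negative food left, return false (as food got spent)
--     food_left = 0
--     day = 1
--
--     for i in range(1,days_to_survive+1):
--         if i%7 != 0:
--             food_left = food_left + max_food - req_food
--             if food_left < 0:
--                 return False
--         else:
--             food_left -= req_food
--             if food_left < 0:
--                 return False
--     return True
-- ===== SOURCE B (Python) =====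
-- def IslandSurvival(days_to_survive, max_food, req_food):
--     # O(1): weekly net change + running minimum within a week, instead of a per-day loop.
--     n = days_to_survive
--     if n <= 0:
--         return True
--     d = max_food - req_food
--     week = 6 * d - req_food
--     q, r = divmod(n, 7)
--     if q >= 1:
--         in_week = min(d, 6 * d, 6 * d - req_food)
--         if min(0, (q - 1) * week) + in_week < 0:
--             return False
--     if r >= 1:
--         if q * week + min(d, r * d) < 0:
--             return False
--     return True
-- ===== Notes on version B (the rewrite author's own statement) =====
-- stated objective: faster
-- what changed: Replaced the day-by-day simulation loop by an O(1) closed form: the week's net food change and the running minimum within a (first/last) week decide survival.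
import Mathlib
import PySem

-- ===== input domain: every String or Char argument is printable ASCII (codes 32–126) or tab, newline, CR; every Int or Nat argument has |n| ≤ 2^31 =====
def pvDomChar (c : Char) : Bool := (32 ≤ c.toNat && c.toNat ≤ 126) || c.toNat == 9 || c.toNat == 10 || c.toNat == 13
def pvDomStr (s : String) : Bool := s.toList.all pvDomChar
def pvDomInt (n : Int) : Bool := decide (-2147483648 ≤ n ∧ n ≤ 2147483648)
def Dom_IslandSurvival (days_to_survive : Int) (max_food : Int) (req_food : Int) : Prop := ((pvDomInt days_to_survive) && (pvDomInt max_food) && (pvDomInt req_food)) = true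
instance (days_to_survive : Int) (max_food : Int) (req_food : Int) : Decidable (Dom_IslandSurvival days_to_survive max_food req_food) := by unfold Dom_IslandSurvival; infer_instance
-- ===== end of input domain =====

-- B replaces A's per-day simulation loop with an O(1) closed form (weekly net change
-- plus in-week running minimum); proved to return the same Bool on every input.

-- ===== PORT A =====
-- A's for-loop over range(1, days_to_survive+1): `fuel` counts the remaining iterations,
-- `i` is the current day, `food_left` the stock; returning false = A's early `return False`
def pvLoopA (max_food req_food : Int) : Nat → Int → Int → Bool
  | 0, _, _ => true
  | fuel + 1, i, food_left =>
    if PySem.Int.mod i 7 ≠ 0 then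
      let f' := food_left + max_food - req_food
      if f' < 0 then false else pvLoopA max_food req_food fuel (i + 1) f'
    else
      let f' := food_left - req_food
      if f' < 0 then false else pvLoopA max_food req_food fuel (i + 1) f'

def IslandSurvival (days_to_survive : Int) (max_food : Int) (req_food : Int) : Bool :=
  pvLoopA max_food req_food days_to_survive.toNat 1 0

-- ===== PORT B =====
def IslandSurvival_alt (days_to_survive : Int) (max_food : Int) (req_food : Int) : Bool :=
  if days_to_survive ≤ 0 then true
  else
    let d := max_food - req_food
    let week := 6 * d - req_food
    let q := PySem.Int.floordiv days_to_survive 7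
    let r := PySem.Int.mod days_to_survive 7
    if 1 ≤ q ∧ min 0 ((q - 1) * week) + min (min d (6 * d)) (6 * d - req_food) < 0 then false
    else if 1 ≤ r ∧ q * week + min d (r * d) < 0 then false
    else true

-- ===== PRECONDITION & SPEC =====
def Spec_IslandSurvival (days_to_survive : Int) (max_food : Int) (req_food : Int) (out : Bool) : Prop := out = IslandSurvival_alt days_to_survive max_food req_food
instance (days_to_survive : Int) (max_food : Int) (req_food : Int) (out : Bool) : Decidable (Spec_IslandSurvival days_to_survive max_food req_food out) := by unfold Spec_IslandSurvival; infer_instance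

-- ===== CLAIM (what is proved, stated in full; the proofs are below) =====
def Claim_equal_IslandSurvival : Prop := ∀ (days_to_survive : Int) (max_food : Int) (req_food : Int), Dom_IslandSurvival days_to_survive max_food req_food → Spec_IslandSurvival days_to_survive max_food req_food (IslandSurvival days_to_survive max_food req_food)

-- ===== LEMMAS AND PROOFS =====

-- proof-only view of one loop iteration as a step on an Option state (none = returned False)
def pvStepA (max_food req_food : Int) (st : Option Int) (i : Int) : Option Int :=
  match st with
  | none => none
  | some food_left =>
    if PySem.Int.mod i 7 ≠ 0 then
      let f' := food_left + max_food - req_food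
      if f' < 0 then none else some f'
    else
      let f' := food_left - req_food
      if f' < 0 then none else some f'

theorem foldl_pvStepA_none (m r : Int) (l : List Int) :
    l.foldl (pvStepA m r) none = none := by
  induction l with
  | nil => rfl
  | cons x xs ih => simpa [pvStepA] using ih

theorem pvStepA_none (m r i : Int) : pvStepA m r none i = none := rfl

theorem pvStepA_some (m r f i : Int) : pvStepA m r (some f) i =
    if PySem.Int.mod i 7 ≠ 0 then (if f + m - r < 0 then none else some (f + m - r))
    else (if f - r < 0 then none else some (f - r)) := rfl

theorem pvStepA_ite (m r i : Int) (c : Prop) [Decidable c] (a b : Option Int) :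
    pvStepA m r (if c then a else b) i = if c then pvStepA m r a i else pvStepA m r b i :=
  apply_ite (fun st => pvStepA m r st i) c a b

theorem pvLoopA_succ (m r : Int) (k : Nat) (i f : Int) :
    pvLoopA m r (k + 1) i f =
      if PySem.Int.mod i 7 ≠ 0 then
        (if f + m - r < 0 then false else pvLoopA m r k (i + 1) (f + m - r))
      else (if f - r < 0 then false else pvLoopA m r k (i + 1) (f - r)) := rfl

-- the fuel loop is the fold of pvStepA over the days it still has to run
theorem pvLoopA_eq (m r : Int) : ∀ (fuel : Nat) (i f : Int),
    pvLoopA m r fuel i f =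
      ((PySem.List.pyRange i (i + (fuel : Int)) 1).foldl (pvStepA m r) (some f)).isSome := by
  intro fuel
  induction fuel with
  | zero =>
    intro i f
    rw [PySem.List.pyRange_one_eq_nil (by omega)]
    rfl
  | succ k ih =>
    intro i f
    rw [PySem.List.pyRange_one_cons (by push_cast; omega), List.foldl_cons]
    have hrest : i + ((k + 1 : Nat) : Int) = (i + 1) + (k : Int) := by push_cast; ring
    rw [hrest]
    by_cases hm : PySem.Int.mod i 7 ≠ 0
    · by_cases hf : f + m - r < 0
      · rw [pvLoopA_succ, if_pos hm, if_pos hf, pvStepA_some, if_pos hm, if_pos hf,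
            foldl_pvStepA_none]
        rfl
      · rw [pvLoopA_succ, if_pos hm, if_neg hf, pvStepA_some, if_pos hm, if_neg hf]
        exact ih (i + 1) (f + m - r)
    · by_cases hf : f - r < 0
      · rw [pvLoopA_succ, if_neg hm, if_pos hf, pvStepA_some, if_neg hm, if_pos hf,
            foldl_pvStepA_none]
        rfl
      · rw [pvLoopA_succ, if_neg hm, if_neg hf, pvStepA_some, if_neg hm, if_neg hf]
        exact ih (i + 1) (f - r)

-- one full week starting at day 7*w+1 with stock f
set_option maxHeartbeats 1000000 in
theorem pvWeekStep (m r w f : Int) :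
    (PySem.List.pyRange (7 * w + 1) (7 * w + 8) 1).foldl (pvStepA m r) (some f) =
      if f + min (min (m - r) (6 * (m - r))) (6 * (m - r) - r) < 0 then none
      else some (f + (6 * (m - r) - r)) := by
  rw [PySem.List.pyRange_one_cons (by omega), PySem.List.pyRange_one_cons (by omega),
      PySem.List.pyRange_one_cons (by omega), PySem.List.pyRange_one_cons (by omega),
      PySem.List.pyRange_one_cons (by omega), PySem.List.pyRange_one_cons (by omega),
      PySem.List.pyRange_one_cons (by omega), PySem.List.pyRange_one_eq_nil (by omega)]
  have h1 : PySem.Int.mod (7 * w + 1) 7 = 1 := by rw [PySem.Int.mod_eq_emod_of_pos (by norm_num)]; omega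
  have h2 : PySem.Int.mod (7 * w + 1 + 1) 7 = 2 := by rw [PySem.Int.mod_eq_emod_of_pos (by norm_num)]; omega
  have h3 : PySem.Int.mod (7 * w + 1 + 1 + 1) 7 = 3 := by rw [PySem.Int.mod_eq_emod_of_pos (by norm_num)]; omega
  have h4 : PySem.Int.mod (7 * w + 1 + 1 + 1 + 1) 7 = 4 := by rw [PySem.Int.mod_eq_emod_of_pos (by norm_num)]; omega
  have h5 : PySem.Int.mod (7 * w + 1 + 1 + 1 + 1 + 1) 7 = 5 := by rw [PySem.Int.mod_eq_emod_of_pos (by norm_num)]; omega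
  have h6 : PySem.Int.mod (7 * w + 1 + 1 + 1 + 1 + 1 + 1) 7 = 6 := by rw [PySem.Int.mod_eq_emod_of_pos (by norm_num)]; omega
  have h7 : PySem.Int.mod (7 * w + 1 + 1 + 1 + 1 + 1 + 1 + 1) 7 = 0 := by rw [PySem.Int.mod_eq_emod_of_pos (by norm_num)]; omega
  simp only [List.foldl_cons, List.foldl_nil, pvStepA_ite, pvStepA_some, pvStepA_none, h1, h2, h3,
    h4, h5, h6, h7]
  norm_num
  split_ifs <;> first | rfl | omega | (congr 1; ring)

-- all q full weeks, starting from stock f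
theorem pvWeeks (m r : Int) (q : Nat) (f : Int) :
    (PySem.List.pyRange 1 (7 * (q : Int) + 1) 1).foldl (pvStepA m r) (some f) =
      if ∀ j : Nat, j < q →
          0 ≤ f + (j : Int) * (6 * (m - r) - r) + min (min (m - r) (6 * (m - r))) (6 * (m - r) - r)
      then some (f + (q : Int) * (6 * (m - r) - r)) else none := by
  induction q with
  | zero =>
    rw [PySem.List.pyRange_one_eq_nil (by omega)]
    simp
  | succ k ih =>
    rw [PySem.List.pyRange_one_append 1 (7 * (k : Int) + 1) (7 * ((k : Nat).succ : Int) + 1)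
        (by omega) (by push_cast; omega), List.foldl_append, ih]
    have hseg : (7 * ((k : Nat).succ : Int) + 1) = 7 * (k : Int) + 8 := by push_cast; ring
    rw [hseg]
    by_cases hall : ∀ j : Nat, j < k →
        0 ≤ f + (j : Int) * (6 * (m - r) - r) + min (min (m - r) (6 * (m - r))) (6 * (m - r) - r)
    · rw [if_pos hall, pvWeekStep]
      by_cases hk : 0 ≤ f + (k : Int) * (6 * (m - r) - r) + min (min (m - r) (6 * (m - r))) (6 * (m - r) - r)
      · rw [if_neg (by omega), if_pos]
        · congr 1; push_cast; ring
        · intro j hj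
          rcases Nat.lt_succ_iff_lt_or_eq.mp hj with h | h
          · exact hall j h
          · subst h; exact hk
      · rw [if_pos (by omega), if_neg]
        intro hc
        exact hk (hc k (Nat.lt_succ_self k))
    · rw [if_neg hall, foldl_pvStepA_none, if_neg]
      intro hc
      exact hall fun j hj => hc j (Nat.lt_succ_of_lt hj)

-- the trailing partial week of t < 7 days, starting at day 7*q+1 with stock f
set_option maxHeartbeats 1000000 in
theorem pvTail (m r q : Int) (t : Nat) (ht : t ≤ 6) (f : Int) :
    (PySem.List.pyRange (7 * q + 1) (7 * q + 1 + (t : Int)) 1).foldl (pvStepA m r) (some f) =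
      if t = 0 then some f
      else if f + min (m - r) ((t : Int) * (m - r)) < 0 then none
      else some (f + (t : Int) * (m - r)) := by
  interval_cases t
  all_goals (repeat rw [PySem.List.pyRange_one_cons (by push_cast; omega)])
  all_goals rw [PySem.List.pyRange_one_eq_nil (by push_cast; omega)]
  all_goals (
    have h1 : PySem.Int.mod (7 * q + 1) 7 = 1 := by rw [PySem.Int.mod_eq_emod_of_pos (by norm_num)]; omega
    have h2 : PySem.Int.mod (7 * q + 1 + 1) 7 = 2 := by rw [PySem.Int.mod_eq_emod_of_pos (by norm_num)]; omega
    have h3 : PySem.Int.mod (7 * q + 1 + 1 + 1) 7 = 3 := by rw [PySem.Int.mod_eq_emod_of_pos (by norm_num)]; omega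
    have h4 : PySem.Int.mod (7 * q + 1 + 1 + 1 + 1) 7 = 4 := by rw [PySem.Int.mod_eq_emod_of_pos (by norm_num)]; omega
    have h5 : PySem.Int.mod (7 * q + 1 + 1 + 1 + 1 + 1) 7 = 5 := by rw [PySem.Int.mod_eq_emod_of_pos (by norm_num)]; omega
    have h6 : PySem.Int.mod (7 * q + 1 + 1 + 1 + 1 + 1 + 1) 7 = 6 := by rw [PySem.Int.mod_eq_emod_of_pos (by norm_num)]; omega
    try simp only [List.foldl_cons, List.foldl_nil, pvStepA_ite, pvStepA_some, pvStepA_none,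
      h1, h2, h3, h4, h5, h6])
  all_goals push_cast
  all_goals (first | rfl | (split_ifs <;> first | rfl | (exfalso; omega) | omega | (congr 1; push_cast; ring)))

-- linearity: the per-week survival conditions reduce to their endpoints
theorem pvForallWeeks (W c : Int) (q : Nat) (hq : 1 ≤ q) :
    (∀ j : Nat, j < q → 0 ≤ (0:Int) + (j : Int) * W + c) ↔
      0 ≤ min 0 (((q : Int) - 1) * W) + c := by
  constructor
  · intro h
    have h0 := h 0 (by omega)
    norm_num at h0
    have hq1 := h (q - 1) (by omega)
    have hc : ((q - 1 : Nat) : Int) = (q : Int) - 1 := by push_cast [Nat.cast_sub hq]; ring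
    rw [hc] at hq1
    rcases min_cases (0:Int) (((q : Int) - 1) * W) with ⟨he, _⟩ | ⟨he, _⟩ <;> rw [he] <;> linarith
  · intro h j hj
    have hj' : (j : Int) ≤ (q : Int) - 1 := by
      have : (j : Int) < (q : Int) := by exact_mod_cast hj
      omega
    rcases le_total 0 W with hW | hW
    · have h1 : 0 ≤ (j : Int) * W := mul_nonneg (by positivity) hW
      have h2 := min_le_left (0:Int) (((q : Int) - 1) * W)
      linarith
    · have h1 : ((q : Int) - 1) * W ≤ (j : Int) * W :=
        mul_le_mul_of_nonpos_right hj' hW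
      have h2 := min_le_right (0:Int) (((q : Int) - 1) * W)
      linarith

-- ===== VERDICT (by name: the statement is the Claim_ definition above) =====
theorem IslandSurvival_spec : Claim_equal_IslandSurvival := by
  intro n m r _
  unfold Spec_IslandSurvival IslandSurvival IslandSurvival_alt
  rw [pvLoopA_eq]
  by_cases hn : n ≤ 0
  · rw [show n.toNat = 0 by omega, PySem.List.pyRange_one_eq_nil (by norm_num), if_pos hn]
    rfl
  · rw [show (1:Int) + (n.toNat : Int) = n + 1 by omega, if_neg hn,
        PySem.Int.floordiv_eq_ediv_of_pos (by norm_num),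
        PySem.Int.mod_eq_emod_of_pos (by norm_num)]
    obtain ⟨q, hqc⟩ : ∃ q : Nat, (q : Int) = n / 7 :=
      ⟨(n / 7).toNat, Int.toNat_of_nonneg (Int.ediv_nonneg (by omega) (by norm_num))⟩
    obtain ⟨t, htc⟩ : ∃ t : Nat, (t : Int) = n % 7 :=
      ⟨(n % 7).toNat, Int.toNat_of_nonneg (Int.emod_nonneg n (by norm_num))⟩
    have ht6 : t ≤ 6 := by omega
    rw [PySem.List.pyRange_one_append 1 (7 * (q : Int) + 1) (n + 1) (by omega) (by omega),
        List.foldl_append, pvWeeks, show n + 1 = 7 * (q : Int) + 1 + (t : Int) by omega,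
        ← hqc, ← htc]
    by_cases hall : ∀ j : Nat, j < q →
        0 ≤ (0:Int) + (j : Int) * (6 * (m - r) - r) + min (min (m - r) (6 * (m - r))) (6 * (m - r) - r)
    · rw [if_pos hall, pvTail m r (q : Int) t ht6]
      by_cases hqpos : 1 ≤ q
      · have hmin := (pvForallWeeks (6 * (m - r) - r)
          (min (min (m - r) (6 * (m - r))) (6 * (m - r) - r)) q hqpos).mp hall
        rw [if_neg (show ¬(1 ≤ (q : Int) ∧
            min 0 (((q : Int) - 1) * (6 * (m - r) - r)) + min (min (m - r) (6 * (m - r))) (6 * (m - r) - r) < 0)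
          from fun hcon => absurd hcon.2 (by linarith))]
        by_cases htpos : t = 0
        · rw [if_pos htpos, if_neg (show ¬(1 ≤ (t : Int) ∧
              (q : Int) * (6 * (m - r) - r) + min (m - r) ((t : Int) * (m - r)) < 0)
            from fun hcon => by rw [htpos] at hcon; exact absurd hcon.1 (by norm_num))]
          simp
        · rw [if_neg htpos]
          have ht1 : 1 ≤ (t : Int) := by exact_mod_cast Nat.one_le_iff_ne_zero.mpr htpos
          by_cases hfail : (0:Int) + (q : Int) * (6 * (m - r) - r) + min (m - r) ((t : Int) * (m - r)) < 0
          · rw [if_pos hfail, if_pos ⟨ht1, by linarith⟩]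
            rfl
          · rw [if_neg hfail, if_neg (show ¬(1 ≤ (t : Int) ∧
                (q : Int) * (6 * (m - r) - r) + min (m - r) ((t : Int) * (m - r)) < 0)
              from fun hcon => absurd hcon.2 (by linarith))]
            rfl
      · have hq0' : (q : Int) = 0 := by
          have : q = 0 := by omega
          exact_mod_cast this
        rw [hq0']
        simp only [zero_mul, add_zero, zero_add]
        rw [if_neg (show ¬((1:Int) ≤ 0 ∧
            min 0 ((0 - 1) * (6 * (m - r) - r)) + min (min (m - r) (6 * (m - r))) (6 * (m - r) - r) < 0)
          from fun hcon => by norm_num at hcon)]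
        by_cases htpos : t = 0
        · exfalso
          omega
        · rw [if_neg htpos]
          have ht1 : 1 ≤ (t : Int) := by exact_mod_cast Nat.one_le_iff_ne_zero.mpr htpos
          by_cases hfail : min (m - r) ((t : Int) * (m - r)) < 0
          · rw [if_pos hfail, if_pos ⟨ht1, by linarith⟩]
            rfl
          · rw [if_neg hfail, if_neg (show ¬(1 ≤ (t : Int) ∧
                min (m - r) ((t : Int) * (m - r)) < 0)
              from fun hcon => absurd hcon.2 (by linarith))]
            rfl
    · rw [if_neg hall, foldl_pvStepA_none]
      have hqpos : 1 ≤ q := by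
        rcases Nat.eq_zero_or_pos q with h0 | h1
        · exfalso
          apply hall
          intro j hj
          rw [h0] at hj
          exact absurd hj (Nat.not_lt_zero j)
        · exact h1
      have hmin := (pvForallWeeks (6 * (m - r) - r)
        (min (min (m - r) (6 * (m - r))) (6 * (m - r) - r)) q hqpos).not.mp hall
      have hlt := not_le.mp hmin
      rw [if_pos ⟨by exact_mod_cast hqpos, by linarith⟩]
      rfl
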